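-- pv_equiv track=rewrite | github.com/srinidhisg88/Competitive-programming | 800/1766A.py | check
-- ===== SOURCE A (Python) =====
-- def check(x):
--     count_zeros=0
--     count_digits=0
--     while x:
--         sub=x%10
--         if sub==0:
--             count_zeros+=1
--         count_digits+=1
--         x=x//10
--     return count_zeros==count_digits-1
-- ===== SOURCE B (Python) =====
-- def check(x):
--     s = str(x)
--     return s.count('0') == len(s) - 1
-- ===== Notes on version B (the rewrite author's own statement) =====
-- stated objective: idiomatic
-- what changed: Replaces the arithmetic digit-extraction loop with counters by a single pass over the decimal string: str(x).count('0') == len(str(x)) - 1; Pre_ restricts to nonnegative x because A's while-loop never terminates on negative x (x//10 stalls at -1).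
import Mathlib
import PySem

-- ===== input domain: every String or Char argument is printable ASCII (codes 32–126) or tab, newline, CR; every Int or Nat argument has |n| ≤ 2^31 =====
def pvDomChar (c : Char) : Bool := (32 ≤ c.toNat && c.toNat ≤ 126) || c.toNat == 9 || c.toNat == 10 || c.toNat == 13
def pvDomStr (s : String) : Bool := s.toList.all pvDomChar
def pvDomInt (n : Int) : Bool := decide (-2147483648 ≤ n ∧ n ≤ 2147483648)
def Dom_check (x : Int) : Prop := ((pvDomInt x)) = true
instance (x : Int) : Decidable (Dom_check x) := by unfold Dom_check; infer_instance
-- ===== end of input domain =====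

-- B rewrites A's arithmetic digit-extraction loop as one pass over the decimal string
-- (str(x).count('0') == len(str(x)) - 1); equivalence is proved for 0 ≤ x, where A's loop terminates.

-- ===== PORT A =====
-- while x: loop; the `0 < x` guard is the totality guard (for 0 ≤ x it is exactly Python's `while x:`;
-- on negative x the Python loop never terminates, excluded by Pre_).
def checkLoop (x cz cd : Int) : Int × Int :=
  if h : 0 < x then
    let sub := PySem.Int.mod x 10
    checkLoop (PySem.Int.floordiv x 10) (if sub = 0 then cz + 1 else cz) (cd + 1)
  else (cz, cd)
termination_by x.toNat
decreasing_by
  have h10 : PySem.Int.floordiv x 10 = x / 10 := PySem.Int.floordiv_eq_ediv_of_pos (by omega)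
  rw [h10]; omega

def check (x : Int) : Bool :=
  let r := checkLoop x 0 0
  decide (r.1 = r.2 - 1)

-- ===== PORT B =====
def check_alt (x : Int) : Bool :=
  let s := PySem.Int.toStr x
  decide ((PySem.Str.count s "0" : Int) = PySem.Str.len s - 1)

-- ===== PRECONDITION & SPEC =====
-- Pre_ excludes negative x: there A's `while x:` with x//10 never reaches 0, so A never returns.
def Pre_check (x : Int) : Prop := 0 ≤ x
instance (x : Int) : Decidable (Pre_check x) := by unfold Pre_check; infer_instance
def pvWitness_check : Int := 100

def Spec_check (x : Int) (out : Bool) : Prop := out = check_alt x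
instance (x : Int) (out : Bool) : Decidable (Spec_check x out) := by unfold Spec_check; infer_instance

-- ===== CLAIM (what is proved, stated in full; the proofs are below) =====
def Claim_equal_check : Prop := ∀ (x : Int), Dom_check x → Pre_check x → Spec_check x (check x)

-- ===== LEMMAS AND PROOFS =====

-- A's loop counts the zero digits and the digits of n (Nat.digits view).
theorem checkLoop_eq (n : Nat) : ∀ (cz cd : Int),
    checkLoop (n : Int) cz cd =
      (cz + ((Nat.digits 10 n).count 0 : Int), cd + ((Nat.digits 10 n).length : Int)) := by
  induction n using Nat.strong_induction_on with
  | _ n ih =>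
    intro cz cd
    rw [checkLoop]
    by_cases hn : 0 < n
    · have hpos : (0 : Int) < (n : Int) := by exact_mod_cast hn
      rw [dif_pos hpos]
      have hm : PySem.Int.mod (n : Int) 10 = ((n % 10 : Nat) : Int) := by
        exact_mod_cast PySem.Int.mod_natCast n 10
      have hd : PySem.Int.floordiv (n : Int) 10 = ((n / 10 : Nat) : Int) := by
        exact_mod_cast PySem.Int.floordiv_natCast n 10
      rw [hm, hd, ih (n / 10) (Nat.div_lt_self hn (by norm_num))]
      rw [Nat.digits_def' (by norm_num : (1:ℕ) < 10) hn]
      simp only [List.count_cons, List.length_cons]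
      by_cases h0 : n % 10 = 0
      · have h0' : ((n % 10 : Nat) : Int) = 0 := by exact_mod_cast h0
        simp only [h0, if_pos, beq_self_eq_true, Prod.mk.injEq]
        constructor <;> push_cast <;> ring
      · have h0' : ¬ ((n % 10 : Nat) : Int) = 0 := by exact_mod_cast h0
        simp only [h0, h0', if_false, beq_iff_eq, Prod.mk.injEq]
        constructor <;> push_cast <;> ring
    · have h0 : n = 0 := by omega
      subst h0
      simp

-- digitChar of a digit < 10 is '0' exactly for the digit 0.
theorem digitChar_eq_zero_iff (d : Nat) (hd : d < 10) : (Nat.digitChar d = '0') ↔ d = 0 := by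
  interval_cases d <;> simp <;> decide

-- the decimal character list of n (most significant first).
def rep (n : Nat) : List Char :=
  if n = 0 then ['0'] else ((Nat.digits 10 n).map Nat.digitChar).reverse

theorem toDigitsCore_eq (fuel : Nat) : ∀ (n : Nat) (ds : List Char), n ≤ fuel →
    Nat.toDigitsCore 10 (fuel + 1) n ds = rep n ++ ds := by
  induction fuel with
  | zero =>
    intro n ds hn
    have : n = 0 := by omega
    subst this
    simp [Nat.toDigitsCore, rep]
    decide
  | succ f ih =>
    intro n ds hn
    show Nat.toDigitsCore 10 (f + 1 + 1) n ds = rep n ++ ds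
    rw [Nat.toDigitsCore]
    by_cases hq : n / 10 = 0
    · have hlt : n < 10 := by omega
      simp only [hq]
      by_cases h0 : n = 0
      · subst h0; simp [rep]; decide
      · have : Nat.digits 10 n = [n % 10] := by
          rw [Nat.digits_def' (by norm_num : (1:ℕ) < 10) (by omega), hq]
          simp
        simp [rep, h0, this, Nat.mod_eq_of_lt hlt]
    · have hge : 10 ≤ n := by
        by_contra h
        exact hq (Nat.div_eq_of_lt (by omega))
      simp only [hq]
      rw [ih (n / 10) _ (by omega)]
      have hrep : rep n = rep (n / 10) ++ [Nat.digitChar (n % 10)] := by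
        have hn0 : n ≠ 0 := by omega
        rw [rep, rep, if_neg hn0, if_neg hq,
          Nat.digits_def' (by norm_num : (1:ℕ) < 10) (by omega)]
        simp
      rw [hrep, List.append_assoc]
      rfl

theorem toDigits_eq (n : Nat) : Nat.toDigits 10 n = rep n := by
  have := toDigitsCore_eq n n [] le_rfl
  simpa [Nat.toDigits] using this

-- counting a single character with PySem's substring counter is List.count.
theorem count_go_singleton (fuel : Nat) : ∀ (cs : List Char) (acc : Nat), cs.length ≤ fuel →
    PySem.Chars.count.go ['0'] fuel cs acc = acc + cs.count '0' := by
  induction fuel with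
  | zero =>
    intro cs acc h
    have : cs = [] := List.eq_nil_of_length_eq_zero (by omega)
    subst this
    simp [PySem.Chars.count.go]
  | succ f ih =>
    intro cs acc h
    cases cs with
    | nil => simp [PySem.Chars.count.go]
    | cons c t =>
      rw [PySem.Chars.count.go]
      by_cases hc : c = '0'
      · subst hc
        have hp : List.isPrefixOf ['0'] ('0' :: t) = true := by
          simp [List.isPrefixOf]
        rw [if_pos hp]
        simp only [List.length_cons] at h
        rw [show List.drop (List.length ['0']) ('0' :: t) = t by simp]
        rw [ih t (acc + 1) (by omega)]
        simp
        omega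
      · have hp : List.isPrefixOf ['0'] (c :: t) = false := by
          simp [List.isPrefixOf]
          exact fun h => absurd h.symm hc
        rw [if_neg (by simp [hp])]
        simp only [List.length_cons] at h
        rw [ih t acc (by omega)]
        simp [hc]

theorem chars_count_singleton (cs : List Char) :
    PySem.Chars.count cs ['0'] = cs.count '0' := by
  rw [PySem.Chars.count]
  simp only [List.isEmpty_iff, reduceCtorEq, if_false]
  simpa using count_go_singleton cs.length cs 0 le_rfl

-- count of '0' in rep n is the count of digit 0; length of rep n.
theorem count_map_digitChar (l : List Nat) (h : ∀ m ∈ l, m < 10) :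
    (l.map Nat.digitChar).count '0' = l.count 0 := by
  induction l with
  | nil => simp
  | cons d t iht =>
    simp only [List.map_cons, List.count_cons]
    rw [iht (fun m hm => h m (List.mem_cons_of_mem d hm))]
    have hd := digitChar_eq_zero_iff d (h d List.mem_cons_self)
    by_cases h0 : d = 0
    · subst h0; simp; decide
    · have hne : Nat.digitChar d ≠ '0' := fun hh => h0 (hd.mp hh)
      simp [h0, hne]

theorem count_rep (n : Nat) (hn : 0 < n) :
    (rep n).count '0' = (Nat.digits 10 n).count 0 := by
  rw [rep, if_neg (by omega), List.count_reverse]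
  exact count_map_digitChar _ (fun m hm => Nat.digits_lt_base (by norm_num) hm)

theorem length_rep (n : Nat) (hn : 0 < n) :
    (rep n).length = (Nat.digits 10 n).length := by
  rw [rep, if_neg (by omega)]
  simp

-- ===== VERDICT (by name: the statement is the Claim_ definition above) =====
theorem check_spec : Claim_equal_check := by
  intro x _ hpre
  unfold Spec_check
  obtain ⟨n, rfl⟩ : ∃ n : Nat, x = (n : Int) := ⟨x.toNat, (Int.toNat_of_nonneg hpre).symm⟩
  have hA : check (n : Int) =
      decide ((((Nat.digits 10 n).count 0 : Nat) : Int) = (((Nat.digits 10 n).length : Nat) : Int) - 1) := by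
    rw [check, checkLoop_eq]
    simp
  have htc : (PySem.Int.toStr (n : Int)).toList = rep n := by
    rw [PySem.Int.toList_toStr, PySem.Int.toChars]
    rw [if_neg (by omega)]
    simp [toDigits_eq]
  have hB : check_alt (n : Int) =
      decide ((((rep n).count '0' : Nat) : Int) = (((rep n).length : Nat) : Int) - 1) := by
    rw [check_alt]
    have hcnt : PySem.Str.count (PySem.Int.toStr (n : Int)) "0" = (rep n).count '0' := by
      rw [PySem.Str.count, htc]
      exact chars_count_singleton (rep n)
    have hlen : PySem.Str.len (PySem.Int.toStr (n : Int)) = ((rep n).length : Int) := by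
      rw [PySem.Str.len, htc]
    rw [hcnt, hlen]
  rw [hA, hB]
  by_cases hn : 0 < n
  · rw [count_rep n hn, length_rep n hn]
  · have : n = 0 := by omega
    subst this
    simp [rep]
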